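-- pv_equiv track=rewrite | github.com/dimas-tri-sulaksono/xsis-assignment-2023 | BLQ/soal_22.py | lilin_pertama_habis_meleleh
-- ===== SOURCE A (Python) =====
-- def lilin_pertama_habis_meleleh(panjang_lilin_awal):
--     fibonacci = [1, 1]
--     while fibonacci[-1] <= max(panjang_lilin_awal):
--         fibonacci.append(fibonacci[-1] + fibonacci[-2])
--
--     waktu_meleleh = [1] * len(panjang_lilin_awal)
--
--     for i, panjang in enumerate(panjang_lilin_awal):
--         waktu = 0
--         for fib in reversed(fibonacci):
--             while panjang >= fib:
--                 panjang -= fib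
--                 waktu += 1
--         waktu_meleleh[i] = waktu
--
--     return waktu_meleleh.index(min(waktu_meleleh)) + 1
-- ===== SOURCE B (Python) =====
-- def _terms(p, fibs):
--     # number of greedy Fibonacci-decomposition terms; fibs is sorted descending
--     if p <= 0 or not fibs:
--         return 0
--     f = fibs[0]
--     if p >= f:
--         return p // f + _terms(p % f, fibs[1:])
--     return _terms(p, fibs[1:])
--
--
-- def lilin_pertama_habis_meleleh(panjang_lilin_awal):
--     m = max(panjang_lilin_awal)
--     fibs = [1, 1]
--     while fibs[-1] <= m:
--         fibs.append(fibs[-1] + fibs[-2])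
--     fibs.reverse()
--     best_i = 0
--     best_c = _terms(panjang_lilin_awal[0], fibs)
--     for i, p in enumerate(panjang_lilin_awal[1:], 1):
--         c = _terms(p, fibs)
--         if c < best_c:
--             best_i, best_c = i, c
--     return best_i + 1
-- ===== Notes on version B (the rewrite author's own statement) =====
-- stated objective: alternative
-- what changed: Replaces the full waktu_meleleh list plus index(min()) with a single pass keeping a running (best_index, best_count) updated on strict '<', and replaces the per-candle repeated-subtraction while loops with one recursive divmod-based term counter over the descending Fibonacci list.
import Mathlib
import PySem

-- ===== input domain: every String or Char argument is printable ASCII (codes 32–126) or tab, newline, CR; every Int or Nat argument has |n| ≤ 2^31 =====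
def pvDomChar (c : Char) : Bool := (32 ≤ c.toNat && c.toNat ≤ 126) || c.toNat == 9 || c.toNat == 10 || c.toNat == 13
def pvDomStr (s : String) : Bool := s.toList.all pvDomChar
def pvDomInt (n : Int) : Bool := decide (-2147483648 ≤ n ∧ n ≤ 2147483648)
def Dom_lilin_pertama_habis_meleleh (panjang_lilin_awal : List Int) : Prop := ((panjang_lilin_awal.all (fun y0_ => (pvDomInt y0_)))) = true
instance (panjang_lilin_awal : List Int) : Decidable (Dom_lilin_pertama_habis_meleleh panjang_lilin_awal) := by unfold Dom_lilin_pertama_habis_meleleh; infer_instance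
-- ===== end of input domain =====

-- B replaces the waktu_meleleh list + index(min()) with a one-pass running best and the
-- per-candle repeated subtraction with a recursive divmod term counter (objective: alternative).

-- ===== PORT A =====
-- while fibonacci[-1] <= max(...): append fibonacci[-1]+fibonacci[-2]
-- (carrying the last two entries a, b; the '1 ≤ a' conjunct is a totality guard only:
-- it holds on every state reached from the initial [1, 1])
def pvFibA (m a b : Int) (acc : List Int) : List Int :=
  if _h : b ≤ m ∧ 1 ≤ a then
    pvFibA m b (a + b) (acc ++ [a + b])
  else acc
termination_by (m + 1 - b).toNat
decreasing_by omega

-- while panjang >= fib: panjang -= fib; waktu += 1   ('1 ≤ f' is a totality guard only)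
def pvWhileSub (p f w : Int) : Int × Int :=
  if _h : f ≤ p ∧ 1 ≤ f then pvWhileSub (p - f) f (w + 1) else (p, w)
termination_by p.toNat
decreasing_by omega

-- for fib in reversed(fibonacci): while ...
def pvWaktuA (p : Int) (fibs : List Int) : Int :=
  (fibs.reverse.foldl (fun s f => pvWhileSub s.1 f s.2) (p, 0)).2

def lilin_pertama_habis_meleleh (panjang_lilin_awal : List Int) : Int :=
  match PySem.List.max? panjang_lilin_awal (fun y => y) with
  | none => 0  -- unreachable under Pre_: max([]) raises ValueError
  | some m =>
    let fibonacci := pvFibA m 1 1 [1, 1]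
    let waktu_meleleh := panjang_lilin_awal.map (fun p => pvWaktuA p fibonacci)
    match PySem.List.min? waktu_meleleh (fun y => y) with
    | none => 0  -- unreachable: list nonempty here
    | some mn => ((PySem.List.index? waktu_meleleh mn).getD 0 : Int) + 1

-- ===== PORT B =====
def pvFibB (m a b : Int) (acc : List Int) : List Int :=
  if _h : b ≤ m ∧ 1 ≤ a then
    pvFibB m b (a + b) (acc ++ [a + b])
  else acc
termination_by (m + 1 - b).toNat
decreasing_by omega

-- _terms(p, fibs): greedy term count by divmod over the descending fib list
def pvTerms (p : Int) (fibs : List Int) : Int :=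
  if p ≤ 0 then 0
  else
    match fibs with
    | [] => 0
    | f :: rest =>
      if f ≤ p then PySem.Int.floordiv p f + pvTerms (PySem.Int.mod p f) rest
      else pvTerms p rest

-- the for-loop keeping (best_i, best_c), strict '<' so the earliest minimum wins
def pvBest (fibs : List Int) : List Int → Int → Int → Int → Int
  | [], bi, _, _ => bi
  | p :: rest, bi, bc, i =>
    let c := pvTerms p fibs
    if c < bc then pvBest fibs rest i c (i + 1) else pvBest fibs rest bi bc (i + 1)

def lilin_pertama_habis_meleleh_alt (panjang_lilin_awal : List Int) : Int :=
  match PySem.List.max? panjang_lilin_awal (fun y => y) with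
  | none => 0  -- unreachable under Pre_
  | some m =>
    match panjang_lilin_awal with
    | [] => 0  -- unreachable: max? returned some
    | p0 :: rest =>
      let fibs := (pvFibB m 1 1 [1, 1]).reverse
      pvBest fibs rest 0 (pvTerms p0 fibs) 1 + 1

-- ===== PRECONDITION & SPEC =====
-- Pre_ excludes only the empty list, on which A raises ValueError (max of empty sequence).
def Pre_lilin_pertama_habis_meleleh (panjang_lilin_awal : List Int) : Prop :=
  panjang_lilin_awal ≠ []
instance (panjang_lilin_awal : List Int) : Decidable (Pre_lilin_pertama_habis_meleleh panjang_lilin_awal) := by unfold Pre_lilin_pertama_habis_meleleh; infer_instance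
def pvWitness_lilin_pertama_habis_meleleh : List Int := [4, 2, 7]

def Spec_lilin_pertama_habis_meleleh (panjang_lilin_awal : List Int) (out : Int) : Prop := out = lilin_pertama_habis_meleleh_alt panjang_lilin_awal
instance (panjang_lilin_awal : List Int) (out : Int) : Decidable (Spec_lilin_pertama_habis_meleleh panjang_lilin_awal out) := by unfold Spec_lilin_pertama_habis_meleleh; infer_instance

-- ===== CLAIM (what is proved, stated in full; the proofs are below) =====
def Claim_equal_lilin_pertama_habis_meleleh : Prop := ∀ (panjang_lilin_awal : List Int), Dom_lilin_pertama_habis_meleleh panjang_lilin_awal → Pre_lilin_pertama_habis_meleleh panjang_lilin_awal → Spec_lilin_pertama_habis_meleleh panjang_lilin_awal (lilin_pertama_habis_meleleh panjang_lilin_awal)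

-- ===== LEMMAS AND PROOFS =====

-- the two fib builders are identical recursions
theorem pvFibA_eq_pvFibB (m a b : Int) (acc : List Int) : pvFibA m a b acc = pvFibB m a b acc := by
  unfold pvFibA pvFibB
  split
  · exact pvFibA_eq_pvFibB m b (a + b) (acc ++ [a + b])
  · rfl
termination_by (m + 1 - b).toNat
decreasing_by omega

-- every element of the fib list is ≥ 1
theorem pvFibA_pos (m a b : Int) (acc : List Int) (ha : 1 ≤ a) (hb : 1 ≤ b)
    (hacc : ∀ x ∈ acc, 1 ≤ x) : ∀ x ∈ pvFibA m a b acc, 1 ≤ x := by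
  unfold pvFibA
  split
  · exact pvFibA_pos m b (a + b) (acc ++ [a + b]) hb (by omega)
      (by intro x hx
          rcases List.mem_append.1 hx with h | h
          · exact hacc x h
          · simp at h; omega)
  · exact hacc
termination_by (m + 1 - b).toNat
decreasing_by omega

-- the inner while loop is a divmod
theorem pvWhileSub_eq (p f w : Int) (hf : 1 ≤ f) :
    pvWhileSub p f w =
      if f ≤ p then (PySem.Int.mod p f, w + PySem.Int.floordiv p f) else (p, w) := by
  unfold pvWhileSub
  rw [PySem.Int.mod_eq_emod_of_pos (by omega), PySem.Int.floordiv_eq_ediv_of_pos (by omega)]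
  split
  case isTrue h =>
    rw [pvWhileSub_eq (p - f) f (w + 1) hf]
    rw [PySem.Int.mod_eq_emod_of_pos (by omega), PySem.Int.floordiv_eq_ediv_of_pos (by omega)]
    have hm : (p - f) % f = p % f := Int.sub_emod_right p f
    have hd : (p - f) / f = p / f - 1 := by
      have := Int.add_mul_ediv_right p (-1) (show f ≠ 0 by omega)
      simpa [sub_eq_add_neg, neg_mul] using this
    rw [if_pos h.1]
    split
    case isTrue h2 => rw [hm, hd]; simp only [Prod.mk.injEq]; exact ⟨trivial, by ring⟩
    case isFalse h2 =>
      -- f ≤ p < 2f : p / f = 1, p % f = p - f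
      have h2' : p < 2 * f := by omega
      have hmod := Int.emod_add_mul_ediv p f
      have h0 : 0 ≤ p % f := Int.emod_nonneg p (by omega)
      have h1 : p % f < f := Int.emod_lt_of_pos p (by omega)
      have hq : p / f = 1 := by nlinarith [hmod, h0, h1, h.1, h2']
      rw [hq] at hmod
      simp only [mul_one] at hmod
      simp only [Prod.mk.injEq, hq]
      exact ⟨by omega, trivial⟩
  case isFalse h =>
    rw [if_neg (by omega)]
termination_by p.toNat
decreasing_by omega

-- A's reversed-fib fold equals B's recursive term counter
theorem foldl_whileSub_eq_terms (L : List Int) (hL : ∀ f ∈ L, 1 ≤ f) (p w : Int) :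
    (L.foldl (fun s f => pvWhileSub s.1 f s.2) (p, w)).2 = w + pvTerms p L := by
  induction L generalizing p w with
  | nil => simp only [List.foldl_nil]; unfold pvTerms; split <;> simp
  | cons f rest ih =>
    have hf : 1 ≤ f := hL f (by simp)
    have hrest : ∀ g ∈ rest, 1 ≤ g := fun g hg => hL g (by simp [hg])
    simp only [List.foldl_cons]
    rw [pvWhileSub_eq p f w hf]
    by_cases hp : p ≤ 0
    · rw [if_neg (by omega)]
      rw [ih hrest p w]
      unfold pvTerms
      rw [if_pos hp, if_pos hp]
    · rw [show pvTerms p (f :: rest) = if f ≤ p then PySem.Int.floordiv p f + pvTerms (PySem.Int.mod p f) rest else pvTerms p rest by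
        rw [pvTerms, if_neg hp]]
      by_cases h : f ≤ p
      · rw [if_pos h, if_pos h, ih hrest]
        ring
      · rw [if_neg h, if_neg h, ih hrest]

theorem foldl_min_comm (cs : List Int) (a b : Int) :
    cs.foldl min (min a b) = min a (cs.foldl min b) := by
  induction cs generalizing b with
  | nil => rfl
  | cons c t ih => simp only [List.foldl_cons, min_assoc, ih]

-- B's running best equals first index of the minimum
theorem pvBest_eq_argmin (fibs ys : List Int) (bi bc i : Int) :
    pvBest fibs ys bi bc i =
      match PySem.List.min? (ys.map (fun p => pvTerms p fibs)) (fun y => y) with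
      | none => bi
      | some m =>
        if m < bc then
          i + ((PySem.List.index? (ys.map (fun p => pvTerms p fibs)) m).getD 0 : Int)
        else bi := by
  induction ys generalizing bi bc i with
  | nil =>
    rw [show PySem.List.min? (([] : List Int).map (fun p => pvTerms p fibs)) (fun y => y) = none from
      (PySem.List.min?_eq_none_iff _ _).mpr rfl]
    rfl
  | cons p rest ih =>
    simp only [List.map_cons]
    rcases hcs : rest.map (fun p => pvTerms p fibs) with _ | ⟨r, t⟩
    · rw [PySem.List.min?_id_cons]
      simp only [List.foldl_nil]
      rw [pvBest]
      have hrest : rest = [] := by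
        cases rest with
        | nil => rfl
        | cons a b => simp at hcs
      subst hrest
      rw [PySem.List.index?_cons_self]
      by_cases h1 : pvTerms p fibs < bc
      · rw [if_pos h1, if_pos h1, pvBest]
        simp
      · rw [if_neg h1, if_neg h1, pvBest]
    · -- rest maps to r :: t
      have hmin' : PySem.List.min? (rest.map (fun p => pvTerms p fibs)) (fun y => y) =
          some (t.foldl min r) := by rw [hcs, PySem.List.min?_id_cons]
      set m' := t.foldl min r with hm'
      have hcons : PySem.List.min? (pvTerms p fibs :: r :: t) (fun y => y) =
          some (min (pvTerms p fibs) m') := by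
        rw [PySem.List.min?_id_cons]
        simp only [List.foldl_cons]
        rw [foldl_min_comm]
      have hmin2 : PySem.List.min? (r :: t) (fun y => y) = some m' := by
        rw [← hcs]; exact hmin'
      have hmem : m' ∈ r :: t := PySem.List.min?_mem hmin2
      have hks : (PySem.List.index? (r :: t) m').isSome := (PySem.List.index?_isSome_iff _ _).mpr hmem
      obtain ⟨k, hk⟩ := Option.isSome_iff_exists.mp hks
      rw [hcons, pvBest]
      by_cases h1 : pvTerms p fibs < bc
      · rw [if_pos h1, ih, hmin']
        dsimp only
        rw [if_pos (by omega : min (pvTerms p fibs) m' < bc)]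
        by_cases h2 : m' < pvTerms p fibs
        · rw [if_pos h2, min_eq_right (le_of_lt h2)]
          rw [hcs, hk]
          rw [PySem.List.index?_cons_of_ne (r :: t) (show pvTerms p fibs ≠ m' by omega)]
          rw [hk]
          simp only [Option.map_some, Option.getD_some]
          push_cast
          ring
        · rw [if_neg h2, min_eq_left (by omega)]
          rw [PySem.List.index?_cons_self]
          simp
      · rw [if_neg h1, ih, hmin']
        dsimp only
        by_cases h2 : m' < bc
        · rw [if_pos h2]
          rw [if_pos (by omega : min (pvTerms p fibs) m' < bc)]
          rw [min_eq_right (by omega), hcs, hk]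
          rw [PySem.List.index?_cons_of_ne (r :: t) (show pvTerms p fibs ≠ m' by omega)]
          rw [hk]
          simp only [Option.map_some, Option.getD_some]
          push_cast
          ring
        · rw [if_neg h2]
          rw [if_neg (by omega : ¬ min (pvTerms p fibs) m' < bc)]

-- ===== VERDICT (by name: the statement is the Claim_ definition above) =====
theorem lilin_pertama_habis_meleleh_spec : Claim_equal_lilin_pertama_habis_meleleh := by
  intro xs _hdom hpre
  unfold Spec_lilin_pertama_habis_meleleh
  obtain ⟨p0, rest, rfl⟩ : ∃ p0 rest, xs = p0 :: rest := by
    cases xs with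
    | nil => exact absurd rfl hpre
    | cons a b => exact ⟨a, b, rfl⟩
  unfold lilin_pertama_habis_meleleh lilin_pertama_habis_meleleh_alt
  rw [PySem.List.max?_id_cons]
  dsimp only
  set M := List.foldl max p0 rest with hM
  rw [← pvFibA_eq_pvFibB]
  set fibs := pvFibA M 1 1 [1, 1] with hfibs
  have hpos : ∀ x ∈ fibs, 1 ≤ x := by
    rw [hfibs]
    exact pvFibA_pos M 1 1 [1, 1] le_rfl le_rfl (by intro x hx; simp at hx; omega)
  have hposrev : ∀ x ∈ fibs.reverse, 1 ≤ x := by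
    intro x hx; exact hpos x (List.mem_reverse.mp hx)
  have hcost : ∀ p, pvWaktuA p fibs = pvTerms p fibs.reverse := by
    intro p
    unfold pvWaktuA
    rw [foldl_whileSub_eq_terms fibs.reverse hposrev p 0, zero_add]
  simp only [List.map_cons, hcost]
  rw [pvBest_eq_argmin]
  rcases hcs : rest.map (fun p => pvTerms p fibs.reverse) with _ | ⟨r, t⟩
  · rw [PySem.List.min?_id_cons]
    rw [show (PySem.List.min? ([] : List Int) (fun y => y)) = none from
      (PySem.List.min?_eq_none_iff _ _).mpr rfl]
    simp only [List.foldl_nil]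
    rw [PySem.List.index?_cons_self]
    rfl
  · have hmin' : PySem.List.min? (rest.map (fun p => pvTerms p fibs.reverse)) (fun y => y) =
        some (t.foldl min r) := by rw [hcs, PySem.List.min?_id_cons]
    set m' := t.foldl min r with hm'
    set c0 := pvTerms p0 fibs.reverse with hc0
    have hmin2 : PySem.List.min? (r :: t) (fun y => y) = some m' := by
      rw [← hcs]; exact hmin'
    have hmem : m' ∈ r :: t := PySem.List.min?_mem hmin2
    obtain ⟨k, hk⟩ := Option.isSome_iff_exists.mp ((PySem.List.index?_isSome_iff _ _).mpr hmem)
    rw [PySem.List.min?_id_cons, PySem.List.min?_id_cons]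
    dsimp only
    simp only [List.foldl_cons]
    rw [foldl_min_comm, ← hm']
    by_cases h2 : m' < c0
    · rw [if_pos h2, min_eq_right (le_of_lt h2)]
      rw [PySem.List.index?_cons_of_ne (r :: t) (show c0 ≠ m' by omega), hk]
      simp only [Option.map_some, Option.getD_some]
      push_cast
      ring
    · rw [if_neg h2, min_eq_left (by omega)]
      rw [PySem.List.index?_cons_self]
      simp
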